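-- pv_equiv track=rewrite | github.com/pc5401/my_BOJ | 백준/Silver/1455. 뒤집기 II/뒤집기 II.py | solve
-- ===== SOURCE A (Python) =====
-- def solve(n, m, grid):
--     S = [[0] * (m + 2) for _ in range(n + 2)]
--     ans = 0
--     for i in range(n, 0, -1):
--         row = grid[i - 1]
--         for j in range(m, 0, -1):
--             parity = (S[i + 1][j] + S[i][j + 1] - S[i + 1][j + 1]) & 1
--             cur = row[j - 1] ^ parity
--             if cur == 1:
--                 ans += 1
--                 S[i][j] = parity ^ 1
--             else:
--                 S[i][j] = parity
--     return ans
-- ===== SOURCE B (Python) =====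
-- def solve(n, m, grid):
--     # A flip is needed at (i, j) exactly when the 2x2 XOR of the original
--     # grid values (out-of-bounds neighbours count as 0) is 1: no parity
--     # table, just a self-contained local test per cell.
--     ans = 0
--     for i in range(n):
--         for j in range(m):
--             x = grid[i][j]
--             if i + 1 < n:
--                 x ^= grid[i + 1][j]
--             if j + 1 < m:
--                 x ^= grid[i][j + 1]
--                 if i + 1 < n:
--                     x ^= grid[i + 1][j + 1]
--             if x & 1:
--                 ans += 1
--     return ans
-- ===== Notes on version B (the rewrite author's own statement) =====
-- stated objective: simpler
-- what changed: Replaces A's propagated (n+2)x(m+2) cumulative parity table S with a direct per-cell 2x2 XOR test on the original grid (O(1) extra space, no mutable state).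
-- outside the precondition, e.g. on solve(1, 3, [[-4, 4, 1]]): A returns 1, B returns 2
import Mathlib
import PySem

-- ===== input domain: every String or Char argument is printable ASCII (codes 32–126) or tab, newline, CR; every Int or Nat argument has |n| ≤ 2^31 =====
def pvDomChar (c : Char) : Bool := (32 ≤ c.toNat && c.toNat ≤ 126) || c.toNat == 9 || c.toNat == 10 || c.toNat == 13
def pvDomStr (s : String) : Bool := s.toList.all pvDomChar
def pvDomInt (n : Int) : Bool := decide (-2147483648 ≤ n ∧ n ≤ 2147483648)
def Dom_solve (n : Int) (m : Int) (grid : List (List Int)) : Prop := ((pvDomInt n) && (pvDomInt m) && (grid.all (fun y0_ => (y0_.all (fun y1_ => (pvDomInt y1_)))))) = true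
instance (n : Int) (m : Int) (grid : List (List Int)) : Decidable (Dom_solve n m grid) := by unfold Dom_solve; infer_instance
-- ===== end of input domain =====

-- B replaces A's propagated cumulative parity table with a self-contained 2x2 XOR test per cell (simpler, no mutable table).


-- ===== PORT A =====
-- S = [[0]*(m+2) for _ in range(n+2)]; Python's [0]*k is [] for k ≤ 0 — .toNat matches.
-- Python's `x & 1` is PySem.Int.band x 1, `^` is PySem.Int.bxor; list indexing is always
-- in range inside Pre_solve, so the total pyGetD/pySetD forms are used.
def solve (n : Int) (m : Int) (grid : List (List Int)) : Int :=
  let S0 : List (List Int) := (List.range (n + 2).toNat).map (fun _ => List.replicate (m + 2).toNat 0)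
  let r := (PySem.List.pyRange n 0 (-1)).foldl (fun (st : List (List Int) × Int) i =>
      let row := PySem.List.pyGetD grid (i - 1) []
      (PySem.List.pyRange m 0 (-1)).foldl (fun (st : List (List Int) × Int) j =>
          let S := st.1
          let ans := st.2
          let parity := PySem.Int.band
              (PySem.List.pyGetD (PySem.List.pyGetD S (i + 1) []) j 0
               + PySem.List.pyGetD (PySem.List.pyGetD S i []) (j + 1) 0
               - PySem.List.pyGetD (PySem.List.pyGetD S (i + 1) []) (j + 1) 0) 1
          let cur := PySem.Int.bxor (PySem.List.pyGetD row (j - 1) 0) parity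
          if cur == 1 then
            (PySem.List.pySetD S i (PySem.List.pySetD (PySem.List.pyGetD S i []) j (PySem.Int.bxor parity 1)), ans + 1)
          else
            (PySem.List.pySetD S i (PySem.List.pySetD (PySem.List.pyGetD S i []) j parity), ans))
        st)
    (S0, 0)
  r.2

-- ===== PORT B =====
def solve_alt (n : Int) (m : Int) (grid : List (List Int)) : Int :=
  (PySem.List.pyRange 0 n 1).foldl (fun ans i =>
    (PySem.List.pyRange 0 m 1).foldl (fun ans j =>
        let x := PySem.List.pyGetD (PySem.List.pyGetD grid i []) j 0
        let x := if i + 1 < n then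
            PySem.Int.bxor x (PySem.List.pyGetD (PySem.List.pyGetD grid (i + 1) []) j 0) else x
        let x := if j + 1 < m then
            let x := PySem.Int.bxor x (PySem.List.pyGetD (PySem.List.pyGetD grid i []) (j + 1) 0)
            if i + 1 < n then
              PySem.Int.bxor x (PySem.List.pyGetD (PySem.List.pyGetD grid (i + 1) []) (j + 1) 0)
            else x
          else x
        if PySem.Int.band x 1 ≠ 0 then ans + 1 else ans)
      ans)
    0

-- ===== PRECONDITION & SPEC =====
-- Pre_solve: the first n rows exist and have at least m entries (otherwise A raises IndexError),
-- and the n×m cells actually read hold coin values 0/1 — the problem's natural domain; on other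
-- integers A's `cur == 1` test silently skips flips, which B does not reproduce.
def Pre_solve (n : Int) (m : Int) (grid : List (List Int)) : Prop :=
  n.toNat ≤ grid.length ∧
  ∀ row ∈ grid.take n.toNat, m.toNat ≤ row.length ∧ ∀ v ∈ row.take m.toNat, v = 0 ∨ v = 1
instance (n : Int) (m : Int) (grid : List (List Int)) : Decidable (Pre_solve n m grid) := by
  unfold Pre_solve; infer_instance
def pvWitness_solve : Int × Int × List (List Int) := (2, 2, [[1, 0], [0, 1]])

def Spec_solve (n : Int) (m : Int) (grid : List (List Int)) (out : Int) : Prop := out = solve_alt n m grid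
instance (n : Int) (m : Int) (grid : List (List Int)) (out : Int) : Decidable (Spec_solve n m grid out) := by unfold Spec_solve; infer_instance

-- ===== CLAIM (what is proved, stated in full; the proofs are below) =====
def Claim_equal_solve : Prop := ∀ (n : Int) (m : Int) (grid : List (List Int)), Dom_solve n m grid → Pre_solve n m grid → Spec_solve n m grid (solve n m grid)

-- ===== LEMMAS AND PROOFS =====

-- 1-based value of the grid cell (i, j); 0 outside the n'×m' board.
def gv (grid : List (List Int)) (n' m' i j : Nat) : Int :=
  if 1 ≤ i ∧ i ≤ n' ∧ 1 ≤ j ∧ j ≤ m' then (grid.getD (i - 1) []).getD (j - 1) 0 else 0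

-- local 2x2 XOR at 1-based cell (i, j)
def locx (grid : List (List Int)) (n' m' i j : Nat) : Int :=
  PySem.Int.bxor (gv grid n' m' i j)
    (PySem.Int.bxor (gv grid n' m' (i + 1) j)
      (PySem.Int.bxor (gv grid n' m' i (j + 1)) (gv grid n' m' (i + 1) (j + 1))))

-- number of flips in row i among columns 1..J
def cntRow (grid : List (List Int)) (n' m' i : Nat) : Nat → Int
  | 0 => 0
  | J + 1 => cntRow grid n' m' i J + (if locx grid n' m' i (J + 1) = 1 then 1 else 0)

-- number of flips in rows 1..I
def cntAll (grid : List (List Int)) (n' m' : Nat) : Nat → Int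
  | 0 => 0
  | I + 1 => cntAll grid n' m' I + cntRow grid n' m' (I + 1) m'

def S0A (n m : Int) : List (List Int) :=
  (List.range (n + 2).toNat).map (fun _ => List.replicate (m + 2).toNat 0)

def stepA (grid : List (List Int)) (i : Int) (st : List (List Int) × Int) (j : Int) :
    List (List Int) × Int :=
  let S := st.1
  let ans := st.2
  let parity := PySem.Int.band
      (PySem.List.pyGetD (PySem.List.pyGetD S (i + 1) []) j 0
       + PySem.List.pyGetD (PySem.List.pyGetD S i []) (j + 1) 0
       - PySem.List.pyGetD (PySem.List.pyGetD S (i + 1) []) (j + 1) 0) 1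
  let cur := PySem.Int.bxor (PySem.List.pyGetD (PySem.List.pyGetD grid (i - 1) []) (j - 1) 0) parity
  if cur == 1 then
    (PySem.List.pySetD S i (PySem.List.pySetD (PySem.List.pyGetD S i []) j (PySem.Int.bxor parity 1)), ans + 1)
  else
    (PySem.List.pySetD S i (PySem.List.pySetD (PySem.List.pyGetD S i []) j parity), ans)

lemma solve_eq (n m : Int) (grid : List (List Int)) :
    solve n m grid =
      ((PySem.List.pyRange n 0 (-1)).foldl
        (fun st i => (PySem.List.pyRange m 0 (-1)).foldl (stepA grid i) st) (S0A n m, 0)).2 := rfl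

def stepB (grid : List (List Int)) (n m : Int) (i : Int) (ans : Int) (j : Int) : Int :=
  let x := PySem.List.pyGetD (PySem.List.pyGetD grid i []) j 0
  let x := if i + 1 < n then
      PySem.Int.bxor x (PySem.List.pyGetD (PySem.List.pyGetD grid (i + 1) []) j 0) else x
  let x := if j + 1 < m then
      let x := PySem.Int.bxor x (PySem.List.pyGetD (PySem.List.pyGetD grid i []) (j + 1) 0)
      if i + 1 < n then
        PySem.Int.bxor x (PySem.List.pyGetD (PySem.List.pyGetD grid (i + 1) []) (j + 1) 0)
      else x
    else x
  if PySem.Int.band x 1 ≠ 0 then ans + 1 else ans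

lemma solvealt_eq (n m : Int) (grid : List (List Int)) :
    solve_alt n m grid =
      (PySem.List.pyRange 0 n 1).foldl
        (fun ans i => (PySem.List.pyRange 0 m 1).foldl (stepB grid n m i) ans) 0 := rfl

lemma foldl_id {α β : Type} (l : List α) (st : β) : l.foldl (fun st _ => st) st = st := by
  induction l generalizing st with
  | nil => rfl
  | cons a l ih => exact ih st

lemma getD_set_eq {α : Type} (l : List α) (k : Nat) (v d : α) (h : k < l.length) :
    (l.set k v).getD k d = v := by
  simp [List.getD_eq_getElem?_getD, List.getElem?_set, h]

lemma getD_set_ne {α : Type} (l : List α) (k k' : Nat) (v d : α) (h : k' ≠ k) :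
    (l.set k v).getD k' d = l.getD k' d := by
  have hne : ¬ (k = k') := fun hh => h hh.symm
  simp [List.getD_eq_getElem?_getD, List.getElem?_set_ne hne]

lemma getD_replicate_zero (k c : Nat) : (List.replicate k (0 : Int)).getD c 0 = 0 := by
  rcases Nat.lt_or_ge c k with h | h
  · simp [List.getD_eq_getElem?_getD, List.getElem?_replicate, h]
  · rw [List.getD_eq_getElem?_getD, List.getElem?_eq_none (by simpa using h)]
    rfl

lemma gv_oob (grid : List (List Int)) (n' m' i j : Nat)
    (h : ¬ (1 ≤ i ∧ i ≤ n' ∧ 1 ≤ j ∧ j ≤ m')) : gv grid n' m' i j = 0 := by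
  simp [gv, h]

lemma gv_in (grid : List (List Int)) (n' m' i j : Nat)
    (h1 : 1 ≤ i) (h2 : i ≤ n') (h3 : 1 ≤ j) (h4 : j ≤ m') :
    gv grid n' m' i j = (grid.getD (i - 1) []).getD (j - 1) 0 := by
  simp [gv, h1, h2, h3, h4]

-- cells are coin bits under Pre_solve
lemma gv01 (n m : Int) (grid : List (List Int)) (hpre : Pre_solve n m grid)
    (i j : Nat) : gv grid n.toNat m.toNat i j = 0 ∨ gv grid n.toNat m.toNat i j = 1 := by
  unfold gv
  split
  · rename_i h
    obtain ⟨h1, h2, h3, h4⟩ := h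
    obtain ⟨hlen, hrows⟩ := hpre
    have hig : i - 1 < grid.length := by omega
    have htl : i - 1 < (grid.take n.toNat).length := by simp; omega
    have hmem : grid.getD (i - 1) [] ∈ grid.take n.toNat := by
      have hm := List.getElem_mem htl
      rw [List.getElem_take] at hm
      rw [List.getD_eq_getElem?_getD, List.getElem?_eq_getElem hig]
      exact hm
    obtain ⟨hrlen, hvals⟩ := hrows _ hmem
    set row := grid.getD (i - 1) [] with hrow
    by_cases hj : j - 1 < row.length
    · have htr : j - 1 < (row.take m.toNat).length := by simp; omega
      have : row.getD (j - 1) 0 ∈ row.take m.toNat := by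
        have hm := List.getElem_mem htr
        rw [List.getElem_take] at hm
        rw [List.getD_eq_getElem?_getD, List.getElem?_eq_getElem hj]
        exact hm
      exact hvals _ this
    · left
      rw [List.getD_eq_getElem?_getD, List.getElem?_eq_none (by omega)]
      rfl
  · left; rfl

-- parity arithmetic on bits: (a + b - c) & 1 = a ^ (b ^ c)
lemma band_sum_bits (a b c : Int) (ha : a = 0 ∨ a = 1) (hb : b = 0 ∨ b = 1) (hc : c = 0 ∨ c = 1) :
    PySem.Int.band (a + b - c) 1 = PySem.Int.bxor a (PySem.Int.bxor b c) := by
  rcases ha with rfl | rfl <;> rcases hb with rfl | rfl <;> rcases hc with rfl | rfl <;> decide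

lemma stepA_branch (S' : List (List Int)) (row : List Int) (I J : Nat) (ans v p : Int)
    (hv : v = 0 ∨ v = 1) (hp : p = 0 ∨ p = 1) :
    (if (PySem.Int.bxor v p == 1) = true
      then (S'.set I (row.set J (PySem.Int.bxor p 1)), ans + 1)
      else (S'.set I (row.set J p), ans)) =
    (S'.set I (row.set J v), ans + (if PySem.Int.bxor v p = 1 then 1 else 0)) := by
  rcases hv with rfl | rfl <;> rcases hp with rfl | rfl
  · simp [show PySem.Int.bxor (0 : Int) 0 = 0 from by decide]
  · simp [show PySem.Int.bxor (0 : Int) 1 = 1 from by decide]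
  · simp [show PySem.Int.bxor (1 : Int) 0 = 1 from by decide,
      show PySem.Int.bxor (0 : Int) 1 = 1 from by decide]
  · simp [show PySem.Int.bxor (1 : Int) 1 = 0 from by decide]

-- what one inner-loop iteration of A does at cell (I, J)
lemma stepA_cell (grid : List (List Int)) (n' m' I J : Nat)
    (hv : ∀ i j, gv grid n' m' i j = 0 ∨ gv grid n' m' i j = 1)
    (hI1 : 1 ≤ I) (hI2 : I ≤ n') (hJ1 : 1 ≤ J) (hJ2 : J ≤ m')
    (S : List (List Int)) (ans : Int)
    (hUp : ∀ c, (S.getD (I + 1) []).getD c 0 = gv grid n' m' (I + 1) c)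
    (hCur : ∀ c, (S.getD I []).getD c 0 = if J < c then gv grid n' m' I c else 0) :
    stepA grid (I : Int) (S, ans) (J : Int) =
      (S.set I ((S.getD I []).set J (gv grid n' m' I J)),
       ans + (if locx grid n' m' I J = 1 then 1 else 0)) := by
  have e1 : (I : Int) + 1 = ((I + 1 : Nat) : Int) := by push_cast; ring
  have e2 : (J : Int) + 1 = ((J + 1 : Nat) : Int) := by push_cast; ring
  have e3 : (I : Int) - 1 = ((I - 1 : Nat) : Int) := by omega
  have e4 : (J : Int) - 1 = ((J - 1 : Nat) : Int) := by omega
  have ha : (S.getD (I + 1) []).getD J 0 = gv grid n' m' (I + 1) J := hUp J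
  have hb : (S.getD I []).getD (J + 1) 0 = gv grid n' m' I (J + 1) := by
    rw [hCur]; simp
  have hc : (S.getD (I + 1) []).getD (J + 1) 0 = gv grid n' m' (I + 1) (J + 1) := hUp (J + 1)
  have hrv : (grid.getD (I - 1) []).getD (J - 1) 0 = gv grid n' m' I J :=
    (gv_in grid n' m' I J hI1 hI2 hJ1 hJ2).symm
  have hparity : PySem.Int.band
      ((S.getD (I + 1) []).getD J 0 + (S.getD I []).getD (J + 1) 0
        - (S.getD (I + 1) []).getD (J + 1) 0) 1 =
      PySem.Int.bxor (gv grid n' m' (I + 1) J)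
        (PySem.Int.bxor (gv grid n' m' I (J + 1)) (gv grid n' m' (I + 1) (J + 1))) := by
    rw [ha, hb, hc]
    exact band_sum_bits _ _ _ (hv _ _) (hv _ _) (hv _ _)
  have hp01 : PySem.Int.bxor (gv grid n' m' (I + 1) J)
      (PySem.Int.bxor (gv grid n' m' I (J + 1)) (gv grid n' m' (I + 1) (J + 1))) = 0 ∨
      PySem.Int.bxor (gv grid n' m' (I + 1) J)
      (PySem.Int.bxor (gv grid n' m' I (J + 1)) (gv grid n' m' (I + 1) (J + 1))) = 1 := by
    rcases hv (I + 1) J with h1 | h1 <;> rcases hv I (J + 1) with h2 | h2 <;>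
      rcases hv (I + 1) (J + 1) with h3 | h3 <;> rw [h1, h2, h3] <;> decide
  have hloc : locx grid n' m' I J =
      PySem.Int.bxor (gv grid n' m' I J)
        (PySem.Int.bxor (gv grid n' m' (I + 1) J)
          (PySem.Int.bxor (gv grid n' m' I (J + 1)) (gv grid n' m' (I + 1) (J + 1)))) := rfl
  dsimp only [stepA]
  rw [e1, e2, e3, e4]
  simp only [PySem.List.pyGetD_natCast, PySem.List.pySetD_natCast]
  rw [hparity, hrv, hloc]
  exact stepA_branch S (S.getD I []) I J ans _ _ (hv I J) hp01

-- A's inner loop: processes columns J..1 of row I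
lemma innerA (grid : List (List Int)) (n' m' : Nat)
    (hv : ∀ i j, gv grid n' m' i j = 0 ∨ gv grid n' m' i j = 1)
    (I : Nat) (hI1 : 1 ≤ I) (hI2 : I ≤ n') :
    ∀ (J : Nat), J ≤ m' → ∀ (S : List (List Int)) (ans : Int),
      S.length = n' + 2 → (S.getD I []).length = m' + 2 →
      (∀ c, (S.getD (I + 1) []).getD c 0 = gv grid n' m' (I + 1) c) →
      (∀ c, (S.getD I []).getD c 0 = if J < c then gv grid n' m' I c else 0) →
      ∃ S', (PySem.List.pyRange (J : Int) 0 (-1)).foldl (stepA grid (I : Int)) (S, ans) =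
              (S', ans + cntRow grid n' m' I J) ∧
            S'.length = n' + 2 ∧ (S'.getD I []).length = m' + 2 ∧
            (∀ r, r ≠ I → S'.getD r [] = S.getD r []) ∧
            (∀ c, (S'.getD I []).getD c 0 = gv grid n' m' I c) := by
  intro J
  induction J with
  | zero =>
    intro _ S ans hSlen hRlen hUp hCur
    refine ⟨S, ?_, hSlen, hRlen, fun r _ => rfl, ?_⟩
    · rw [PySem.List.pyRange_neg_one_eq_nil (by norm_num)]
      simp [cntRow]
    · intro c
      rcases Nat.eq_zero_or_pos c with rfl | hc
      · rw [hCur]; simp [gv_oob grid n' m' I 0 (by omega)]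
      · rw [hCur]; simp [hc]
  | succ J ih =>
    intro hJ S ans hSlen hRlen hUp hCur
    rw [PySem.List.pyRange_neg_one_cons (by positivity)]
    have ecast : ((J + 1 : Nat) : Int) - 1 = (J : Int) := by push_cast; ring
    rw [List.foldl_cons, ecast]
    rw [stepA_cell grid n' m' I (J + 1) hv hI1 hI2 (by omega) hJ S ans hUp hCur]
    set v := gv grid n' m' I (J + 1) with hvdef
    set S2 := S.set I ((S.getD I []).set (J + 1) v) with hS2
    have hIlt : I < S.length := by omega
    have hS2I : S2.getD I [] = (S.getD I []).set (J + 1) v := by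
      rw [hS2]
      exact getD_set_eq S I _ [] hIlt
    have hJlt : J + 1 < (S.getD I []).length := by omega
    obtain ⟨S', hfold, hl1, hl2, hframe, hrowv⟩ :=
      ih (by omega) S2 (ans + (if locx grid n' m' I (J + 1) = 1 then 1 else 0))
        (by rw [hS2]; simpa using hSlen)
        (by rw [hS2I]; simpa using hRlen)
        (by
          intro c
          rw [hS2, getD_set_ne S I (I + 1) _ [] (by omega)]
          exact hUp c)
        (by
          intro c
          rw [hS2I]
          by_cases hcj : c = J + 1
          · subst hcj
            rw [getD_set_eq _ _ _ _ hJlt]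
            simp [hvdef]
          · rw [getD_set_ne _ _ _ _ _ hcj, hCur c]
            by_cases hc : J < c
            · rw [if_pos (by omega : J + 1 < c), if_pos hc]
            · rw [if_neg (by omega : ¬ J + 1 < c), if_neg hc])
    refine ⟨S', ?_, hl1, hl2, ?_, hrowv⟩
    · rw [hfold]
      simp [cntRow]
      ring
    · intro r hr
      rw [hframe r hr, hS2, getD_set_ne S I r _ [] (fun h => hr h)]

-- A's outer loop: processes rows I..1
lemma outerA (grid : List (List Int)) (n' m' : Nat)
    (hv : ∀ i j, gv grid n' m' i j = 0 ∨ gv grid n' m' i j = 1) :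
    ∀ (I : Nat), I ≤ n' → ∀ (S : List (List Int)) (ans : Int),
      S.length = n' + 2 →
      (∀ r, r ≤ I → S.getD r [] = List.replicate (m' + 2) 0) →
      (∀ c, (S.getD (I + 1) []).getD c 0 = gv grid n' m' (I + 1) c) →
      ((PySem.List.pyRange (I : Int) 0 (-1)).foldl
        (fun st i => (PySem.List.pyRange ((m' : Nat) : Int) 0 (-1)).foldl (stepA grid i) st) (S, ans)).2 =
        ans + cntAll grid n' m' I := by
  intro I
  induction I with
  | zero =>
    intro _ S ans _ _ _
    rw [show PySem.List.pyRange ((0 : Nat) : Int) 0 (-1) = [] from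
      PySem.List.pyRange_neg_one_eq_nil (by norm_num)]
    simp [cntAll]
  | succ I ih =>
    intro hI S ans hSlen hZero hUp
    rw [show PySem.List.pyRange ((I + 1 : Nat) : Int) 0 (-1) =
        ((I + 1 : Nat) : Int) :: PySem.List.pyRange (((I + 1 : Nat) : Int) - 1) 0 (-1) from
      PySem.List.pyRange_neg_one_cons (by positivity)]
    have ecast : ((I + 1 : Nat) : Int) - 1 = (I : Int) := by push_cast; ring
    simp only [List.foldl_cons]
    rw [ecast]
    have hrowI : S.getD (I + 1) [] = List.replicate (m' + 2) 0 := hZero (I + 1) (le_refl _)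
    obtain ⟨S', hfold, hl1, _, hframe, hrowv⟩ :=
      innerA grid n' m' hv (I + 1) (by omega) hI m' (le_refl _) S ans hSlen
        (by rw [hrowI]; simp)
        hUp
        (by
          intro c
          rw [hrowI, getD_replicate_zero]
          by_cases hc : m' < c
          · rw [if_pos hc, gv_oob grid n' m' (I + 1) c (by omega)]
          · rw [if_neg hc])
    rw [hfold]
    rw [ih (by omega) S' (ans + cntRow grid n' m' (I + 1) m') hl1
      (fun r hr => by rw [hframe r (by omega)]; exact hZero r (by omega))
      hrowv]
    simp [cntAll]
    ring

lemma bflag (x y ans : Int) (hxy : PySem.Int.band x 1 = (if y = 1 then 1 else 0)) :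
    (if PySem.Int.band x 1 ≠ 0 then ans + 1 else ans) = ans + (if y = 1 then 1 else 0) := by
  rw [hxy]
  by_cases hy : y = 1 <;> simp [hy]

-- what one inner-loop iteration of B does at 0-based cell (i0, j0)
lemma stepB_cell (grid : List (List Int)) (n m : Int) (n' m' : Nat)
    (hn : n = (n' : Int)) (hm : m = (m' : Int))
    (hv : ∀ i j, gv grid n' m' i j = 0 ∨ gv grid n' m' i j = 1)
    (i0 j0 : Nat) (hi : i0 < n') (hj : j0 < m') (ans : Int) :
    stepB grid n m (i0 : Int) ans (j0 : Int) =
      ans + (if locx grid n' m' (i0 + 1) (j0 + 1) = 1 then 1 else 0) := by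
  have e1 : (i0 : Int) + 1 = ((i0 + 1 : Nat) : Int) := by push_cast; ring
  have e2 : (j0 : Int) + 1 = ((j0 + 1 : Nat) : Int) := by push_cast; ring
  have hgself : (grid.getD i0 []).getD j0 0 = gv grid n' m' (i0 + 1) (j0 + 1) := by
    rw [gv_in grid n' m' (i0 + 1) (j0 + 1) (by omega) (by omega) (by omega) (by omega)]
    simp
  have hcondi : ((i0 : Int) + 1 < n) = (i0 + 2 ≤ n') := by
    apply propext; rw [hn]; constructor <;> intro <;> omega
  have hcondj : ((j0 : Int) + 1 < m) = (j0 + 2 ≤ m') := by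
    apply propext; rw [hm]; constructor <;> intro <;> omega
  dsimp only [stepB]
  simp only [hcondi, hcondj]
  simp only [e1, e2]
  simp only [PySem.List.pyGetD_natCast]
  rw [hgself]
  have hlocx : locx grid n' m' (i0 + 1) (j0 + 1) =
      PySem.Int.bxor (gv grid n' m' (i0 + 1) (j0 + 1))
        (PySem.Int.bxor (gv grid n' m' (i0 + 2) (j0 + 1))
          (PySem.Int.bxor (gv grid n' m' (i0 + 1) (j0 + 2)) (gv grid n' m' (i0 + 2) (j0 + 2)))) := by
    simp [locx]
  by_cases hgi : i0 + 2 ≤ n' <;> by_cases hgj : j0 + 2 ≤ m'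
  · simp only [if_pos hgi, if_pos hgj]
    have hd : (grid.getD (i0 + 1) []).getD j0 0 = gv grid n' m' (i0 + 2) (j0 + 1) := by
      rw [gv_in grid n' m' (i0 + 2) (j0 + 1) (by omega) hgi (by omega) (by omega)]; simp
    have hr : (grid.getD i0 []).getD (j0 + 1) 0 = gv grid n' m' (i0 + 1) (j0 + 2) := by
      rw [gv_in grid n' m' (i0 + 1) (j0 + 2) (by omega) (by omega) (by omega) hgj]; simp
    have hdr : (grid.getD (i0 + 1) []).getD (j0 + 1) 0 = gv grid n' m' (i0 + 2) (j0 + 2) := by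
      rw [gv_in grid n' m' (i0 + 2) (j0 + 2) (by omega) hgi (by omega) hgj]; simp
    rw [hd, hr, hdr, hlocx]
    rcases hv (i0 + 1) (j0 + 1) with h1 | h1 <;> rcases hv (i0 + 2) (j0 + 1) with h2 | h2 <;>
      rcases hv (i0 + 1) (j0 + 2) with h3 | h3 <;> rcases hv (i0 + 2) (j0 + 2) with h4 | h4 <;>
      rw [h1, h2, h3, h4] <;> exact bflag _ _ ans (by decide)
  · simp only [if_pos hgi, if_neg hgj]
    have hd : (grid.getD (i0 + 1) []).getD j0 0 = gv grid n' m' (i0 + 2) (j0 + 1) := by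
      rw [gv_in grid n' m' (i0 + 2) (j0 + 1) (by omega) hgi (by omega) (by omega)]; simp
    have hr0 : gv grid n' m' (i0 + 1) (j0 + 2) = 0 := gv_oob _ _ _ _ _ (by omega)
    have hdr0 : gv grid n' m' (i0 + 2) (j0 + 2) = 0 := gv_oob _ _ _ _ _ (by omega)
    rw [hd, hlocx, hr0, hdr0]
    rcases hv (i0 + 1) (j0 + 1) with h1 | h1 <;> rcases hv (i0 + 2) (j0 + 1) with h2 | h2 <;>
      rw [h1, h2] <;> exact bflag _ _ ans (by decide)
  · simp only [if_neg hgi, if_pos hgj]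
    have hr : (grid.getD i0 []).getD (j0 + 1) 0 = gv grid n' m' (i0 + 1) (j0 + 2) := by
      rw [gv_in grid n' m' (i0 + 1) (j0 + 2) (by omega) (by omega) (by omega) hgj]; simp
    have hd0 : gv grid n' m' (i0 + 2) (j0 + 1) = 0 := gv_oob _ _ _ _ _ (by omega)
    have hdr0 : gv grid n' m' (i0 + 2) (j0 + 2) = 0 := gv_oob _ _ _ _ _ (by omega)
    rw [hr, hlocx, hd0, hdr0]
    rcases hv (i0 + 1) (j0 + 1) with h1 | h1 <;> rcases hv (i0 + 1) (j0 + 2) with h3 | h3 <;>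
      rw [h1, h3] <;> exact bflag _ _ ans (by decide)
  · simp only [if_neg hgi, if_neg hgj]
    have hd0 : gv grid n' m' (i0 + 2) (j0 + 1) = 0 := gv_oob _ _ _ _ _ (by omega)
    have hr0 : gv grid n' m' (i0 + 1) (j0 + 2) = 0 := gv_oob _ _ _ _ _ (by omega)
    have hdr0 : gv grid n' m' (i0 + 2) (j0 + 2) = 0 := gv_oob _ _ _ _ _ (by omega)
    rw [hlocx, hd0, hr0, hdr0]
    rcases hv (i0 + 1) (j0 + 1) with h1 | h1 <;>
      rw [h1] <;> exact bflag _ _ ans (by decide)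

-- B's inner loop over columns 0..J-1 of 0-based row i0
lemma innerB (grid : List (List Int)) (n m : Int) (n' m' : Nat)
    (hn : n = (n' : Int)) (hm : m = (m' : Int))
    (hv : ∀ i j, gv grid n' m' i j = 0 ∨ gv grid n' m' i j = 1)
    (i0 : Nat) (hi : i0 < n') :
    ∀ (J : Nat), J ≤ m' → ∀ (ans : Int),
      (PySem.List.pyRange 0 (J : Int) 1).foldl (stepB grid n m (i0 : Int)) ans =
        ans + cntRow grid n' m' (i0 + 1) J := by
  intro J
  induction J with
  | zero =>
    intro _ ans
    rw [PySem.List.pyRange_one_eq_nil (by norm_num)]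
    simp [cntRow]
  | succ J ih =>
    intro hJ ans
    have : ((J + 1 : Nat) : Int) = (J : Int) + 1 := by push_cast; ring
    rw [this, PySem.List.pyRange_one_succ_right (by positivity)]
    rw [List.foldl_append, List.foldl_cons, List.foldl_nil]
    rw [ih (by omega) ans]
    rw [stepB_cell grid n m n' m' hn hm hv i0 J hi (by omega)]
    simp [cntRow]
    ring

-- B's outer loop over rows 0..I-1
lemma outerB (grid : List (List Int)) (n m : Int) (n' m' : Nat)
    (hn : n = (n' : Int)) (hm : m = (m' : Int))
    (hv : ∀ i j, gv grid n' m' i j = 0 ∨ gv grid n' m' i j = 1) :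
    ∀ (I : Nat), I ≤ n' → ∀ (ans : Int),
      (PySem.List.pyRange 0 (I : Int) 1).foldl
        (fun ans i => (PySem.List.pyRange 0 m 1).foldl (stepB grid n m i) ans) ans =
        ans + cntAll grid n' m' I := by
  intro I
  induction I with
  | zero =>
    intro _ ans
    rw [show PySem.List.pyRange 0 ((0 : Nat) : Int) 1 = [] from
      PySem.List.pyRange_one_eq_nil (by norm_num)]
    simp [cntAll]
  | succ I ih =>
    intro hI ans
    have hc1 : ((I + 1 : Nat) : Int) = (I : Int) + 1 := by push_cast; ring
    rw [show PySem.List.pyRange 0 ((I + 1 : Nat) : Int) 1 =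
        PySem.List.pyRange 0 (I : Int) 1 ++ [(I : Int)] from by
      rw [hc1]; exact PySem.List.pyRange_one_succ_right (by positivity)]
    rw [List.foldl_append, List.foldl_cons, List.foldl_nil]
    rw [ih (by omega) ans]
    rw [show PySem.List.pyRange 0 m 1 = PySem.List.pyRange 0 ((m' : Nat) : Int) 1 from by rw [hm]]
    rw [innerB grid n m n' m' hn hm hv I (by omega) m' (le_refl _)]
    simp [cntAll]
    ring

-- degenerate board: either dimension ≤ 0 makes both programs return 0
lemma solve_nonpos (n m : Int) (grid : List (List Int)) (h : n ≤ 0 ∨ m ≤ 0) :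
    solve n m grid = 0 ∧ solve_alt n m grid = 0 := by
  rcases h with h | h
  · constructor
    · rw [solve_eq, PySem.List.pyRange_neg_one_eq_nil h]; rfl
    · rw [solvealt_eq, PySem.List.pyRange_one_eq_nil h]; rfl
  · constructor
    · rw [solve_eq, show PySem.List.pyRange m 0 (-1) = [] from PySem.List.pyRange_neg_one_eq_nil h]
      simp only [List.foldl_nil]
      rw [foldl_id]
    · rw [solvealt_eq, show PySem.List.pyRange 0 m 1 = [] from PySem.List.pyRange_one_eq_nil h]
      simp only [List.foldl_nil]
      rw [foldl_id]

lemma main_equiv (n m : Int) (grid : List (List Int)) (hpre : Pre_solve n m grid) :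
    solve n m grid = solve_alt n m grid := by
  rcases (by omega : n ≤ 0 ∨ 0 < n) with hn | hn
  · obtain ⟨h1, h2⟩ := solve_nonpos n m grid (Or.inl hn)
    rw [h1, h2]
  rcases (by omega : m ≤ 0 ∨ 0 < m) with hm | hm
  · obtain ⟨h1, h2⟩ := solve_nonpos n m grid (Or.inr hm)
    rw [h1, h2]
  set n' := n.toNat with hn'
  set m' := m.toNat with hm'
  have hnc : n = (n' : Int) := by omega
  have hmc : m = (m' : Int) := by omega
  have hv : ∀ i j, gv grid n' m' i j = 0 ∨ gv grid n' m' i j = 1 := gv01 n m grid hpre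
  -- A side
  have hA : solve n m grid = cntAll grid n' m' n' := by
    rw [solve_eq]
    have hS0len : (S0A n m).length = n' + 2 := by
      simp [S0A]; omega
    have hS0row : ∀ r, r ≤ n' → (S0A n m).getD r [] = List.replicate (m' + 2) 0 := by
      intro r hr
      have hrlt : r < (n + 2).toNat := by omega
      rw [S0A, List.getD_eq_getElem?_getD, List.getElem?_eq_getElem (by simpa using hrlt)]
      simp only [List.getElem_map, Option.getD_some]
      congr 1
      omega
    have hUp : ∀ c, ((S0A n m).getD (n' + 1) []).getD c 0 = gv grid n' m' (n' + 1) c := by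
      intro c
      rw [show (S0A n m).getD (n' + 1) [] = List.replicate (m' + 2) 0 from by
        have hrlt : n' + 1 < (n + 2).toNat := by omega
        rw [S0A, List.getD_eq_getElem?_getD, List.getElem?_eq_getElem (by simpa using hrlt)]
        simp only [List.getElem_map, Option.getD_some]
        congr 1
        omega]
      rw [getD_replicate_zero, gv_oob grid n' m' (n' + 1) c (by omega)]
    have hout := outerA grid n' m' hv n' (le_refl _) (S0A n m) 0 hS0len hS0row hUp
    rw [show PySem.List.pyRange n 0 (-1) = PySem.List.pyRange ((n' : Nat) : Int) 0 (-1) from by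
      rw [hnc]]
    rw [show PySem.List.pyRange m 0 (-1) = PySem.List.pyRange ((m' : Nat) : Int) 0 (-1) from by
      rw [hmc]]
    rw [hout]
    ring
  -- B side
  have hB : solve_alt n m grid = cntAll grid n' m' n' := by
    rw [solvealt_eq]
    rw [show PySem.List.pyRange 0 n 1 = PySem.List.pyRange 0 ((n' : Nat) : Int) 1 from by
      rw [hnc]]
    rw [outerB grid n m n' m' hnc hmc hv n' (le_refl _) 0]
    ring
  rw [hA, hB]

-- ===== VERDICT (by name: the statement is the Claim_ definition above) =====
theorem solve_spec : Claim_equal_solve := by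
  intro n m grid _ hpre
  unfold Spec_solve
  exact main_equiv n m grid hpre
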